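-- pv_equiv track=rewrite | github.com/Prajjawal-Saxena/ai_news_streaming_app | app.py | sse_message
-- ===== SOURCE A (Python) =====
-- def sse_message(data, event=None):
--     payload = str(data).replace("\r\n", "\n").replace("\r", "\n")
--     lines = []
--
--     if event:
--         lines.append(f"event: {event}")
--
--     for line in payload.split("\n"):
--         lines.append(f"data: {line}")
--
--     return "\n".join(lines) + "\n\n"
-- ===== SOURCE B (Python) =====
-- def sse_message(data, event=None):
--     payload = str(data).replace("\r\n", "\n").replace("\r", "\n")
--     body = "data: " + payload.replace("\n", "\ndata: ")
--     prefix = f"event: {event}\n" if event else ""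
--     return prefix + body + "\n\n"
-- ===== Notes on version B (the rewrite author's own statement) =====
-- stated objective: idiomatic
-- what changed: Replaces A's split-into-lines / per-line loop / join pipeline with a single string substitution that inserts the line prefix after every newline, plus a conditional event header.
import Mathlib
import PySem

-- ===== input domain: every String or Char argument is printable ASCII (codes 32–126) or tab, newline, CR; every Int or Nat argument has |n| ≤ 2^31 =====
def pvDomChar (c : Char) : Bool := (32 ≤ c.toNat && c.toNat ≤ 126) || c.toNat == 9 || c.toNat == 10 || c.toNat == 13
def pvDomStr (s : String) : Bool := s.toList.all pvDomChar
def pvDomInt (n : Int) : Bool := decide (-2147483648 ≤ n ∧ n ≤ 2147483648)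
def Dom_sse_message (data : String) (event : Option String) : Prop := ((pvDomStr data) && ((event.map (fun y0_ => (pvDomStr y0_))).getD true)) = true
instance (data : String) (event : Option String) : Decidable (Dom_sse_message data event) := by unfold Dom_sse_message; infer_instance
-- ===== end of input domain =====

-- B replaces A's split-into-lines / per-line loop / join pipeline with a single string
-- substitution inserting the "data: " prefix after every newline (more idiomatic, same cost).

-- ===== PORT A =====
def sse_message (data : String) (event : Option String) : String :=
  let payload := PySem.Str.replace (PySem.Str.replace data "\r\n" "\n") "\r" "\n"
  let lines : List String :=
    match event with
    | some e => if e == "" then [] else ["event: " ++ e]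
    | none => []
  let lines := lines ++ ((PySem.Str.split? payload "\n").getD []).map (fun line => "data: " ++ line)
  PySem.Str.join "\n" lines ++ "\n\n"

-- ===== PORT B =====
def sse_message_alt (data : String) (event : Option String) : String :=
  let payload := PySem.Str.replace (PySem.Str.replace data "\r\n" "\n") "\r" "\n"
  let body := "data: " ++ PySem.Str.replace payload "\n" "\ndata: "
  let pfx : String :=
    match event with
    | some e => if e == "" then "" else "event: " ++ e ++ "\n"
    | none => ""
  pfx ++ body ++ "\n\n"

-- ===== PRECONDITION & SPEC =====
def Spec_sse_message (data : String) (event : Option String) (out : String) : Prop := out = sse_message_alt data event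
instance (data : String) (event : Option String) (out : String) : Decidable (Spec_sse_message data event out) := by unfold Spec_sse_message; infer_instance

-- ===== CLAIM (what is proved, stated in full; the proofs are below) =====
def Claim_equal_sse_message : Prop := ∀ (data : String) (event : Option String), Dom_sse_message data event → Spec_sse_message data event (sse_message data event)

-- ===== LEMMAS AND PROOFS =====

/-- Splitting on a single character, simple structural recursion. -/
def split1 (a : Char) : List Char → List (List Char)
  | [] => [[]]
  | c :: t =>
    if c = a then [] :: split1 a t
    else
      match split1 a t with
      | [] => [[c]]
      | h :: r => (c :: h) :: r

theorem split1_ne_nil (a : Char) (l : List Char) : split1 a l ≠ [] := by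
  cases l with
  | nil => simp [split1]
  | cons c t =>
    simp only [split1]
    split_ifs
    · simp
    · cases h : split1 a t <;> simp

theorem splitOn_go_eq (a : Char) (l : List Char) : ∀ (fuel : Nat) (cur : List Char)
    (acc : List (List Char)), l.length < fuel →
    PySem.Chars.splitOn.go [a] fuel l cur acc
      = acc.reverse ++ (split1 a l).modifyHead (cur.reverse ++ ·) := by
  induction l with
  | nil =>
    intro fuel cur acc h
    cases fuel with
    | zero => omega
    | succ f => simp [PySem.Chars.splitOn.go, split1]
  | cons c t ih =>
    intro fuel cur acc h
    cases fuel with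
    | zero => omega
    | succ f =>
      rw [PySem.Chars.splitOn.go]
      by_cases hc : c = a
      · subst hc
        simp only [List.isPrefixOf, BEq.rfl, if_true, Bool.and_self]
        rw [show List.drop [c].length (c :: t) = t from rfl]
        rw [ih f [] (cur.reverse :: acc) (by simpa using Nat.lt_of_succ_lt_succ h)]
        cases hs : split1 c t with
        | nil => exact absurd hs (split1_ne_nil c t)
        | cons x r => simp [split1, hs]
      · have hp : List.isPrefixOf [a] (c :: t) = false := by
          simp [List.isPrefixOf]
          exact fun h' => absurd h'.symm hc
        rw [hp]
        simp only [if_false, Bool.false_eq_true]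
        rw [ih f (c :: cur) acc (by simpa using Nat.lt_of_succ_lt_succ h)]
        cases hs : split1 a t with
        | nil => exact absurd hs (split1_ne_nil a t)
        | cons x r => simp [split1, hs, hc]

theorem splitOn_single (a : Char) (l : List Char) :
    PySem.Chars.splitOn l [a] = split1 a l := by
  rw [PySem.Chars.splitOn, splitOn_go_eq a l (l.length + 1) [] [] (Nat.lt_succ_self _)]
  cases h : split1 a l with
  | nil => exact absurd h (split1_ne_nil a l)
  | cons x r => simp

theorem replace_go_eq (a : Char) (new : List Char) (l : List Char) :
    ∀ (fuel : Nat) (acc : List Char), l.length ≤ fuel →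
    PySem.Chars.replace.go [a] new fuel l acc
      = acc.reverse ++ l.flatMap (fun c => if c = a then new else [c]) := by
  induction l with
  | nil =>
    intro fuel acc _
    cases fuel <;> simp [PySem.Chars.replace.go]
  | cons c t ih =>
    intro fuel acc h
    cases fuel with
    | zero => simp at h
    | succ f =>
      rw [PySem.Chars.replace.go]
      by_cases hc : c = a
      · subst hc
        simp only [List.isPrefixOf, BEq.rfl, if_true, Bool.and_self]
        rw [show List.drop [c].length (c :: t) = t from rfl]
        rw [ih f (new.reverse ++ acc) (by simpa using Nat.le_of_succ_le_succ h)]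
        simp
      · have hp : List.isPrefixOf [a] (c :: t) = false := by
          simp [List.isPrefixOf]
          exact fun h' => absurd h'.symm hc
        rw [hp]
        simp only [if_false, Bool.false_eq_true]
        rw [ih f (c :: acc) (by simpa using Nat.le_of_succ_le_succ h)]
        simp [hc]

theorem replace_single (a : Char) (new : List Char) (l : List Char) :
    PySem.Chars.replace l [a] new = l.flatMap (fun c => if c = a then new else [c]) := by
  rw [PySem.Chars.replace]
  simp only [List.isEmpty_cons, Bool.false_eq_true, if_false]
  simpa using replace_go_eq a new l l.length [] (Nat.le_refl _)

theorem intercalate_cons (a : Char) (x : List Char) (xs : List (List Char)) :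
    List.intercalate [a] (x :: xs) = x ++ xs.flatMap (fun u => a :: u) := by
  induction xs generalizing x with
  | nil => simp [List.intercalate]
  | cons y r ih =>
    rw [show List.intercalate [a] (x :: y :: r)
          = x ++ [a] ++ List.intercalate [a] (y :: r) from by
        simp [List.intercalate, List.intersperse]]
    rw [ih y]
    simp

/-- Core identity: joining prefixed pieces equals prefix + single-pass replacement. -/
theorem key (a : Char) (pre l : List Char) :
    PySem.Chars.join [a] ((split1 a l).map (pre ++ ·))
      = pre ++ l.flatMap (fun c => if c = a then a :: pre else [c]) := by
  induction l with
  | nil => simp [split1, PySem.Chars.join, List.intercalate]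
  | cons c t ih =>
    by_cases hc : c = a
    · subst hc
      simp only [split1, if_true, List.map_cons]
      cases hs : split1 c t with
      | nil => exact absurd hs (split1_ne_nil c t)
      | cons h r =>
        rw [hs] at ih
        simp only [PySem.Chars.join, List.map_cons, intercalate_cons] at ih ⊢
        simp only [List.flatMap_cons, if_true]
        have := ih
        simp only [List.append_assoc] at this ⊢
        have h2 : h ++ List.flatMap (fun u => c :: u) (List.map (fun x => pre ++ x) r)
            = List.flatMap (fun x => if x = c then c :: pre else [x]) t :=
          List.append_cancel_left this
        simp only [List.nil_append]
        rw [← h2]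
        simp
    · simp only [split1, hc, if_false]
      cases hs : split1 a t with
      | nil => exact absurd hs (split1_ne_nil a t)
      | cons h r =>
        rw [hs] at ih
        simp only [PySem.Chars.join, List.map_cons, intercalate_cons] at ih ⊢
        have h2 : h ++ List.flatMap (fun u => a :: u) (List.map (fun x => pre ++ x) r)
            = List.flatMap (fun x => if x = a then a :: pre else [x]) t := by
          have h3 : pre ++ (h ++ List.flatMap (fun u => a :: u) (List.map (fun x => pre ++ x) r))
              = pre ++ List.flatMap (fun x => if x = a then a :: pre else [x]) t := by
            simpa [List.append_assoc] using ih
          exact List.append_cancel_left h3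
        simp only [List.flatMap_cons, hc, if_false]
        simp [← h2]

theorem join_prefixed (a : Char) (pre l : List Char) :
    PySem.Chars.join [a] ((split1 a l).map (pre ++ ·))
      = pre ++ PySem.Chars.replace l [a] (a :: pre) := by
  rw [replace_single, key]

theorem join_cons_ne (a : Char) (x : List Char) (xs : List (List Char)) (hxs : xs ≠ []) :
    PySem.Chars.join [a] (x :: xs) = x ++ a :: PySem.Chars.join [a] xs := by
  cases xs with
  | nil => exact absurd rfl hxs
  | cons y r => simp [PySem.Chars.join, intercalate_cons]

-- ===== VERDICT (by name: the statement is the Claim_ definition above) =====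
theorem sse_message_spec : Claim_equal_sse_message := by
  intro data event _
  unfold Spec_sse_message sse_message sse_message_alt
  rw [← String.toList_inj]
  set payload := PySem.Str.replace (PySem.Str.replace data "\r\n" "\n") "\r" "\n" with hp
  have hsplit : PySem.Str.split? payload "\n"
      = some ((split1 '\n' payload.toList).map String.ofList) := by
    rw [PySem.Str.split?, PySem.Chars.split?]
    simp [splitOn_single]
  have hpieces : ∀ (ls : List String),
      (PySem.Str.join "\n" ls).toList = PySem.Chars.join ['\n'] (ls.map String.toList) := by
    intro ls; rw [PySem.Str.toList_join]; rfl
  have hbody : (PySem.Str.join "\n"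
        (((PySem.Str.split? payload "\n").getD []).map (fun line => "data: " ++ line))).toList
      = "data: ".toList ++ (PySem.Str.replace payload "\n" "\ndata: ").toList := by
    rw [hsplit, Option.getD_some, hpieces, List.map_map, List.map_map]
    rw [show ((String.toList ∘ fun line => "data: " ++ line) ∘ String.ofList)
          = (fun l => "data: ".toList ++ l) from by
        funext l; simp [String.toList_append]]
    conv_rhs => rw [PySem.Str.toList_replace]
    conv_rhs => rw [show ("\ndata: " : String).toList = '\n' :: "data: ".toList from by decide]
    exact join_prefixed '\n' "data: ".toList payload.toList
  cases event with
  | none =>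
    simp only [List.nil_append, String.toList_append]
    rw [hbody]
    simp [String.toList_append]
  | some e =>
    by_cases he : e == ""
    · simp only [he, if_true, List.nil_append, String.toList_append]
      rw [hbody]
      simp
    · simp only [he, if_false, Bool.false_eq_true, List.singleton_append, String.toList_append]
      rw [hpieces, List.map_cons]
      have hne : (((PySem.Str.split? payload "\n").getD []).map
          (fun line => "data: " ++ line)).map String.toList ≠ [] := by
        rw [hsplit]
        simp only [Option.getD_some, List.map_map, ne_eq, List.map_eq_nil_iff]
        exact split1_ne_nil '\n' payload.toList
      rw [join_cons_ne _ _ _ hne, ← hpieces, hbody]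
      simp
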